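-- pv_equiv track=rewrite | github.com/Michal0ss/WDI | WDI_algo/Zestaw_2/z87.py | find
-- ===== SOURCE A (Python) =====
-- from math import sqrt
--
-- def is_prime(n):
--     if n<=1:
--         return False
--     for i in range(2, int(sqrt(n)) + 1):
--         if n % i == 0:
--             return False
--     return True
--
-- def find(t):
--     n= len(t)
--     product = 1
--     max_idx = None
--     for i in range(n):
--         # Check if the current number is prime
--         if is_prime(t[i]):
--             product *= t[i]
--
--         # Check if the current number is equal to the product
--         if t[i] == product:
--             max_idx = i
--
--     return max_idx
-- ===== SOURCE B (Python) =====
-- from math import sqrt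
--
-- def is_prime(n):
--     if n<=1:
--         return False
--     for i in range(2, int(sqrt(n)) + 1):
--         if n % i == 0:
--             return False
--     return True
--
-- def find(t):
--     # pass 1: prefix-product table (product of all primes among t[0..i])
--     products = []
--     p = 1
--     for x in t:
--         if is_prime(x):
--             p *= x
--         products.append(p)
--     # pass 2: reverse scan, first hit is the highest matching index
--     for i in range(len(t) - 1, -1, -1):
--         if t[i] == products[i]:
--             return i
--     return None
-- ===== Notes on version B (the rewrite author's own statement) =====
-- stated objective: alternative
-- what changed: Replaces the single forward pass with a mutable max_idx by a prefix-product table followed by a short-circuiting reverse scan that returns the first (= highest) matching index.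
import Mathlib
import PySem

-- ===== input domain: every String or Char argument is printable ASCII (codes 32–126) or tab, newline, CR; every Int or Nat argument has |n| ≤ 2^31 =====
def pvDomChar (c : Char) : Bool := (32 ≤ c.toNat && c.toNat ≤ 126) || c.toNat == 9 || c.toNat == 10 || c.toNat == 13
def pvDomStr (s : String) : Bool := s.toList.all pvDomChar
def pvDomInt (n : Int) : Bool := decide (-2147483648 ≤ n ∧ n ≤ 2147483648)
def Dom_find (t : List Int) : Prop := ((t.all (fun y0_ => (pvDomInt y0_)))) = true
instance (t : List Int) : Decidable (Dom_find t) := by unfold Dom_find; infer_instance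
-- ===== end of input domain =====

-- B keeps A's return value but restructures it: a prefix-product table plus a reverse scan
-- instead of A's single forward pass with a mutable max_idx (objective: alternative).

-- ===== PORT A =====
-- shared helper is_prime (identical in Source A and Source B).
-- int(sqrt(n)) is exact = Nat.sqrt on the stated domain |n| ≤ 2^31 (double sqrt cannot
-- cross an integer boundary there), ported as Nat.sqrt n.toNat.
def is_prime (n : Int) : Bool :=
  if n ≤ 1 then false
  else (PySem.List.pyRange 2 ((Nat.sqrt n.toNat : Int) + 1) 1).all
    (fun i => !(PySem.Int.mod n i == 0))

-- the for-loop of A: state (i, product, max_idx)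
def findGo : List Int → Int → Int → Option Int → Option Int
  | [], _, _, m => m
  | x :: xs, i, p, m =>
      let p' := if is_prime x then p * x else p
      findGo xs (i + 1) p' (if x = p' then some i else m)

def find (t : List Int) : Option Int := findGo t 0 1 none

-- ===== PORT B =====
-- pass 1 of B: the prefix-product table (products.append(p) each step)
def prefixProds : List Int → Int → List Int
  | [], _ => []
  | x :: xs, p =>
      let p' := if is_prime x then p * x else p
      p' :: prefixProds xs p'

-- pass 2 of B: for i in range(len(t)-1, -1, -1): if t[i] == products[i]: return i
def revSearch : Nat → List Int → List Int → Option Int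
  | 0, _, _ => none
  | k + 1, t, ps => if t.getD k 0 = ps.getD k 0 then some (k : Int) else revSearch k t ps

def find_alt (t : List Int) : Option Int := revSearch t.length t (prefixProds t 1)

-- ===== PRECONDITION & SPEC =====
def Spec_find (t : List Int) (out : Option Int) : Prop := out = find_alt t
instance (t : List Int) (out : Option Int) : Decidable (Spec_find t out) := by unfold Spec_find; infer_instance

-- ===== CLAIM (what is proved, stated in full; the proofs are below) =====
def Claim_equal_find : Prop := ∀ (t : List Int), Dom_find t → Spec_find t (find t)

-- ===== LEMMAS AND PROOFS =====

-- proof-only helper: the last (rightmost) index i ≥ base at which the two lists agree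
def lastMatch : List Int → List Int → Int → Option Int
  | x :: xs, q :: qs, i =>
      (match lastMatch xs qs (i + 1) with
       | some j => some j
       | none => if x = q then some i else none)
  | _, _, _ => none

theorem prefixProds_length (t : List Int) : ∀ p, (prefixProds t p).length = t.length := by
  induction t with
  | nil => intro p; rfl
  | cons x xs ih => intro p; simp [prefixProds, ih]

theorem findGo_eq_lastMatch (t : List Int) :
    ∀ p i m, findGo t i p m = (lastMatch t (prefixProds t p) i).elim m some := by
  induction t with
  | nil => intro p i m; rfl
  | cons x xs ih =>
      intro p i m
      simp only [findGo, prefixProds, lastMatch]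
      rw [ih]
      cases lastMatch xs (prefixProds xs (if is_prime x then p * x else p)) (i + 1) with
      | some j => rfl
      | none => split_ifs <;> rfl

theorem lastMatch_append (x q : Int) :
    ∀ (t ps : List Int) (i : Int), t.length = ps.length →
      lastMatch (t ++ [x]) (ps ++ [q]) i =
        if x = q then some (i + (t.length : Int)) else lastMatch t ps i := by
  intro t
  induction t with
  | nil =>
      intro ps i h
      cases ps with
      | nil => simp [lastMatch]
      | cons b bs => simp at h
  | cons a t' ih =>
      intro ps i h
      cases ps with
      | nil => simp at h
      | cons b ps' =>
          simp only [List.length_cons] at h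
          simp only [List.cons_append, lastMatch]
          rw [ih ps' (i + 1) (by omega)]
          by_cases hx : x = q
          · simp only [hx]
            have : i + 1 + (t'.length : Int) = i + ((t'.length : Int) + 1) := by ring
            simp [this]
          · simp [hx]

theorem revSearch_eq_lastMatch (t ps : List Int) (h : t.length = ps.length) :
    ∀ k, k ≤ t.length → revSearch k t ps = lastMatch (t.take k) (ps.take k) 0 := by
  intro k
  induction k with
  | zero => intro _; rfl
  | succ k ih =>
      intro hk
      have hkt : k < t.length := by omega
      have hkp : k < ps.length := by omega
      have htake : t.take (k + 1) = t.take k ++ [t[k]] := by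
        rw [List.take_add_one]; simp [List.getElem?_eq_getElem hkt]
      have hpstake : ps.take (k + 1) = ps.take k ++ [ps[k]] := by
        rw [List.take_add_one]; simp [List.getElem?_eq_getElem hkp]
      rw [htake, hpstake,
        lastMatch_append _ _ _ _ 0 (by simp [List.length_take]; omega)]
      simp only [revSearch, List.getD_eq_getElem?_getD, List.getElem?_eq_getElem hkt,
        List.getElem?_eq_getElem hkp, Option.getD_some]
      by_cases hx : t[k] = ps[k]
      · simp [hx, List.length_take, Nat.min_eq_left (Nat.le_of_lt hkt)]
      · simp [hx, ih (by omega)]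

-- ===== VERDICT (by name: the statement is the Claim_ definition above) =====
theorem find_spec : Claim_equal_find := by
  intro t _
  unfold Spec_find find find_alt
  rw [findGo_eq_lastMatch,
    revSearch_eq_lastMatch t (prefixProds t 1) (prefixProds_length t 1).symm t.length le_rfl]
  simp only [List.take_length]
  rw [List.take_of_length_le (by rw [prefixProds_length])]
  cases lastMatch t (prefixProds t 1) 0 <;> simp
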